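-- pv_equiv track=rewrite | github.com/paulklemstine/factor | lean/demo/Pythagorean/qdf_new_directions_demo.py | find_pythagorean_triples
-- ===== SOURCE A (Python) =====
-- import math
-- from typing import List, Tuple, Optional, Dict
--
-- def gcd(a: int, b: int) -> int:
--     """Compute GCD of two integers."""
--     a, b = abs(a), abs(b)
--     while b:
--         a, b = b, a % b
--     return a
--
-- def find_pythagorean_triples(max_c: int) -> List[Tuple[int, int, int]]:
--     """Find primitive Pythagorean triples with hypotenuse ≤ max_c."""
--     triples = []
--     for m in range(2, int(math.sqrt(max_c)) + 1):
--         for n in range(1, m):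
--             if (m - n) % 2 == 0 or gcd(m, n) != 1:
--                 continue
--             a, b, c = m**2 - n**2, 2 * m * n, m**2 + n**2
--             if c <= max_c:
--                 triples.append((min(a, b), max(a, b), c))
--     return sorted(set(triples))
-- ===== SOURCE B (Python) =====
-- def find_pythagorean_triples(max_c):
--     """Find primitive Pythagorean triples with hypotenuse <= max_c.
--
--     Instead of enumerating Euclid (m, n) parameter pairs with parity/gcd
--     filters, walk Berggren's ternary tree: every primitive triple is reached
--     exactly once from the root (3, 4, 5) by the three classical 3x3 generating
--     matrices, and children have strictly larger hypotenuse, so pruning at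
--     c > max_c is complete.  No gcd or parity tests are needed.
--     """
--     out = []
--     stack = [(3, 4, 5)]
--     while stack:
--         a, b, c = stack.pop()
--         if c > max_c:
--             continue
--         out.append((min(a, b), max(a, b), c))
--         stack.append((a - 2 * b + 2 * c, 2 * a - b + 2 * c, 2 * a - 2 * b + 3 * c))
--         stack.append((a + 2 * b + 2 * c, 2 * a + b + 2 * c, 2 * a + 2 * b + 3 * c))
--         stack.append((-a + 2 * b + 2 * c, -2 * a + b + 2 * c, -2 * a + 2 * b + 3 * c))
--     return sorted(set(out))
-- ===== Notes on version B (the rewrite author's own statement) =====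
-- stated objective: alternative
-- what changed: B abandons Euclid's (m,n) double loop with parity/gcd filters entirely: it walks Berggren's ternary tree of primitive triples with an explicit stack from the root (3,4,5), generating children by the three classical 3x3 matrices and pruning once the hypotenuse exceeds max_c (children always have strictly larger hypotenuse), so no gcd or parity test is ever computed.
import Mathlib
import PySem

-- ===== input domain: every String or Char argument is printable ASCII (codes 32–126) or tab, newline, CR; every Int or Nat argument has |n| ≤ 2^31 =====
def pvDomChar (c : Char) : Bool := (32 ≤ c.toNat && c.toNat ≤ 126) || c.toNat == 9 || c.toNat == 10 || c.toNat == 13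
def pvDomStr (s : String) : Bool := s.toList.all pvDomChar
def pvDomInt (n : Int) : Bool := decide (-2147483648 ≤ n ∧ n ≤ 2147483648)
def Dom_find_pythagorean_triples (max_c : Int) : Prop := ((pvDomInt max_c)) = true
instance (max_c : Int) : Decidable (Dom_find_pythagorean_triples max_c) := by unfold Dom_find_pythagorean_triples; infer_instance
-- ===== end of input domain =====

-- B replaces A's Euclid (m,n) double loop with parity/gcd filters by a stack-driven walk of
-- Berggren's ternary tree of primitive triples rooted at (3,4,5), pruned at hypotenuse > max_c
-- (alternative algorithm, similar cost).

-- Python's sorted on tuples of ints compares lexicographically: both ports sort with this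
-- injective key into the lexicographic product order, which is exactly that comparison.
def pvKey (t : Int × Int × Int) : Int ×ₗ (Int ×ₗ Int) := toLex (t.1, toLex (t.2.1, t.2.2))

-- ===== PORT A =====
-- while b: a, b = b, a % b   (Python % = PySem.Int.mod)
def pygcdLoop (a b : Int) : Int :=
  if h : b ≠ 0 then pygcdLoop b (PySem.Int.mod a b) else a
termination_by b.natAbs
decreasing_by
  rcases lt_or_gt_of_ne h with hb | hb
  · have := PySem.Int.mod_neg_bounds a hb; omega
  · have h1 := PySem.Int.mod_nonneg a hb
    have h2 := PySem.Int.mod_lt a hb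
    omega

def pygcd (a b : Int) : Int := pygcdLoop |a| |b|

-- the nested for-loops building `triples`
def pvRawA (max_c : Int) : List (Int × Int × Int) :=
  (PySem.List.pyRange 2 (Int.sqrt max_c + 1) 1).foldl (fun acc m =>
    (PySem.List.pyRange 1 m 1).foldl (fun acc n =>
      if PySem.Int.mod (m - n) 2 = 0 ∨ pygcd m n ≠ 1 then acc
      else
        let a := m ^ 2 - n ^ 2
        let b := 2 * m * n
        let c := m ^ 2 + n ^ 2
        if c ≤ max_c then acc ++ [(min a b, max a b, c)] else acc) acc) []

-- int(math.sqrt(max_c)) is ported as Int.sqrt: for 0 ≤ max_c ≤ 2^31 (the stated domain, ≪ 2^52)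
-- the correctly rounded float sqrt has int(math.sqrt(x)) = isqrt(x) exactly.
def find_pythagorean_triples (max_c : Int) : List (Int × Int × Int) :=
  PySem.List.sorted (PySem.Set.ofList (pvRawA max_c)) pvKey false

-- ===== PORT B =====
-- loop invariant carried by the stack (termination only): positive legs, each below the hypotenuse
def pvInv (t : Int × Int × Int) : Prop :=
  0 < t.1 ∧ 0 < t.2.1 ∧ t.1 < t.2.2 ∧ t.2.1 < t.2.2

-- the three Berggren child matrices
def pvC1 (t : Int × Int × Int) : Int × Int × Int :=
  (t.1 - 2 * t.2.1 + 2 * t.2.2, 2 * t.1 - t.2.1 + 2 * t.2.2, 2 * t.1 - 2 * t.2.1 + 3 * t.2.2)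
def pvC2 (t : Int × Int × Int) : Int × Int × Int :=
  (t.1 + 2 * t.2.1 + 2 * t.2.2, 2 * t.1 + t.2.1 + 2 * t.2.2, 2 * t.1 + 2 * t.2.1 + 3 * t.2.2)
def pvC3 (t : Int × Int × Int) : Int × Int × Int :=
  (-t.1 + 2 * t.2.1 + 2 * t.2.2, -2 * t.1 + t.2.1 + 2 * t.2.2, -2 * t.1 + 2 * t.2.1 + 3 * t.2.2)

-- tiny linear facts (minimal hypotheses keep the generated certificates small)
lemma pvo1 (x y z : Int) (h1 : 0 < x) (h2 : y < z) : 0 < x - 2 * y + 2 * z := by omega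
lemma pvo2 (x y z : Int) (h1 : 0 < x) (h0 : 0 < y) (h2 : y < z) : 0 < 2 * x - y + 2 * z := by
  omega
lemma pvo3 (x y z : Int) (h1 : 0 < x) (h2 : 0 < y) (h3 : y < z) :
    x - 2 * y + 2 * z < 2 * x - 2 * y + 3 * z := by omega
lemma pvo4 (x y z : Int) (h2 : y < z) : 2 * x - y + 2 * z < 2 * x - 2 * y + 3 * z := by omega
lemma pvo5 (x y z : Int) (h1 : 0 < x) (h2 : y < z) : z < 2 * x - 2 * y + 3 * z := by omega
lemma pvo6 (x y z : Int) (h1 : 0 < x) (h2 : 0 < y) (h3 : y < z) : 0 < x + 2 * y + 2 * z := by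
  omega
lemma pvo7 (x y z : Int) (h1 : 0 < x) (h2 : 0 < y) (h3 : y < z) : 0 < 2 * x + y + 2 * z := by
  omega
lemma pvo8 (x y z : Int) (h1 : 0 < x) (h2 : 0 < y) (h3 : y < z) :
    x + 2 * y + 2 * z < 2 * x + 2 * y + 3 * z := by omega
lemma pvo9 (x y z : Int) (h2 : 0 < y) (h3 : y < z) :
    2 * x + y + 2 * z < 2 * x + 2 * y + 3 * z := by omega
lemma pvo10 (x y z : Int) (h1 : 0 < x) (h2 : 0 < y) (h3 : y < z) :
    z < 2 * x + 2 * y + 3 * z := by omega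
lemma pvo11 (x y z : Int) (h2 : 0 < y) (h3 : y < z) (h4 : x < z) : 0 < -x + 2 * y + 2 * z := by
  omega
lemma pvo12 (x y z : Int) (h2 : 0 < y) (h4 : x < z) : 0 < -2 * x + y + 2 * z := by omega
lemma pvo13 (x y z : Int) (h4 : x < z) :
    -x + 2 * y + 2 * z < -2 * x + 2 * y + 3 * z := by omega
lemma pvo14 (x y z : Int) (h2 : 0 < y) (h3 : y < z) :
    -2 * x + y + 2 * z < -2 * x + 2 * y + 3 * z := by omega
lemma pvo15 (x y z : Int) (h2 : 0 < y) (h4 : x < z) : z < -2 * x + 2 * y + 3 * z := by omega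

lemma pvInv_c1 (t : Int × Int × Int) (h : pvInv t) : pvInv (pvC1 t) ∧ t.2.2 < (pvC1 t).2.2 := by
  obtain ⟨a, b, c⟩ := t
  obtain ⟨h1, h2, h3, h4⟩ := h
  exact ⟨⟨pvo1 a b c h1 h4, pvo2 a b c h1 h2 h4, pvo3 a b c h1 h2 h4, pvo4 a b c h4⟩,
    pvo5 a b c h1 h4⟩

lemma pvInv_c2 (t : Int × Int × Int) (h : pvInv t) : pvInv (pvC2 t) ∧ t.2.2 < (pvC2 t).2.2 := by
  obtain ⟨a, b, c⟩ := t
  obtain ⟨h1, h2, h3, h4⟩ := h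
  exact ⟨⟨pvo6 a b c h1 h2 h4, pvo7 a b c h1 h2 h4, pvo8 a b c h1 h2 h4, pvo9 a b c h2 h4⟩,
    pvo10 a b c h1 h2 h4⟩

lemma pvInv_c3 (t : Int × Int × Int) (h : pvInv t) : pvInv (pvC3 t) ∧ t.2.2 < (pvC3 t).2.2 := by
  obtain ⟨a, b, c⟩ := t
  obtain ⟨h1, h2, h3, h4⟩ := h
  exact ⟨⟨pvo11 a b c h2 h4 h3, pvo12 a b c h2 h3, pvo13 a b c h3, pvo14 a b c h2 h4⟩,
    pvo15 a b c h2 h3⟩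

-- stack weight for the termination measure
def pvW (max_c : Int) (s : {t : Int × Int × Int // pvInv t}) : Nat :=
  4 ^ ((max_c + 1 - s.1.2.2).toNat)

-- three branches of one smaller exponent against the full weight
lemma pv_pow_step (k1 k2 k3 k S : Nat) (h1 : k1 < k) (h2 : k2 < k) (h3 : k3 < k) :
    4 ^ k1 + (4 ^ k2 + (4 ^ k3 + S)) < 4 ^ k + S := by
  have b1 : 4 ^ k1 ≤ 4 ^ (k - 1) := Nat.pow_le_pow_right (by decide) (Nat.le_pred_of_lt h1)
  have b2 : 4 ^ k2 ≤ 4 ^ (k - 1) := Nat.pow_le_pow_right (by decide) (Nat.le_pred_of_lt h2)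
  have b3 : 4 ^ k3 ≤ 4 ^ (k - 1) := Nat.pow_le_pow_right (by decide) (Nat.le_pred_of_lt h3)
  have hp : 0 < 4 ^ (k - 1) := Nat.pow_pos (by decide)
  have hk : 4 ^ k = 4 ^ (k - 1) * 4 := by
    rw [← Nat.pow_succ]
    congr 1
    exact (Nat.sub_add_cancel (Nat.zero_lt_of_lt h1)).symm
  omega

-- toNat bracket for the child exponents
lemma pv_toNat_lt (max_c c c' : Int) (hlt : c < c') (hle : c ≤ max_c) :
    (max_c + 1 - c').toNat < (max_c + 1 - c).toNat :=
  (Int.toNat_lt_toNat (sub_pos.mpr (Int.lt_add_one_iff.mpr hle))).mpr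
    (sub_lt_sub_left hlt (max_c + 1))

-- measure facts cited by pvLoop's termination proof
lemma pvLoop_dec_push (max_c : Int) (t : Int × Int × Int) (h : pvInv t) (hle : t.2.2 ≤ max_c)
    (rest : List {t : Int × Int × Int // pvInv t}) :
    (List.map (pvW max_c)
        (⟨pvC3 t, (pvInv_c3 t h).1⟩ :: ⟨pvC2 t, (pvInv_c2 t h).1⟩ ::
          ⟨pvC1 t, (pvInv_c1 t h).1⟩ :: rest)).sum <
      (List.map (pvW max_c) (⟨t, h⟩ :: rest)).sum := by
  simp only [List.map_cons, List.sum_cons, pvW]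
  exact pv_pow_step _ _ _ _ _ (pv_toNat_lt max_c t.2.2 _ (pvInv_c3 t h).2 hle)
    (pv_toNat_lt max_c t.2.2 _ (pvInv_c2 t h).2 hle)
    (pv_toNat_lt max_c t.2.2 _ (pvInv_c1 t h).2 hle)

lemma pvLoop_dec_skip (max_c : Int) (t : Int × Int × Int) (h : pvInv t)
    (rest : List {t : Int × Int × Int // pvInv t}) :
    (List.map (pvW max_c) rest).sum < (List.map (pvW max_c) (⟨t, h⟩ :: rest)).sum := by
  simp only [List.map_cons, List.sum_cons]
  exact Nat.lt_add_of_pos_left (Nat.pow_pos (by decide))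

-- the while loop over the explicit stack (top = head; Python pops from the end, so the three
-- appends put pvC3 on top); the invariant rides along as a subtype proof (termination only)
def pvLoop (max_c : Int) (stack : List {t : Int × Int × Int // pvInv t})
    (out : List (Int × Int × Int)) : List (Int × Int × Int) :=
  match stack with
  | [] => out
  | ⟨t, h⟩ :: rest =>
    if hle : t.2.2 ≤ max_c then
      pvLoop max_c
        (⟨pvC3 t, (pvInv_c3 t h).1⟩ :: ⟨pvC2 t, (pvInv_c2 t h).1⟩ :: ⟨pvC1 t, (pvInv_c1 t h).1⟩ :: rest)
        (out ++ [(min t.1 t.2.1, max t.1 t.2.1, t.2.2)])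
    else pvLoop max_c rest out
termination_by (stack.map (pvW max_c)).sum
decreasing_by
  · exact pvLoop_dec_push max_c t h hle rest
  · exact pvLoop_dec_skip max_c t h rest

def pvRawB (max_c : Int) : List (Int × Int × Int) :=
  pvLoop max_c [⟨(3, 4, 5), ⟨by decide, by decide, by decide, by decide⟩⟩] []

def find_pythagorean_triples_alt (max_c : Int) : List (Int × Int × Int) :=
  PySem.List.sorted (PySem.Set.ofList (pvRawB max_c)) pvKey false

-- ===== PRECONDITION & SPEC =====
-- math.sqrt raises ValueError for a negative argument, so A returns only on 0 ≤ max_c.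
def Pre_find_pythagorean_triples (max_c : Int) : Prop := 0 ≤ max_c
instance (max_c : Int) : Decidable (Pre_find_pythagorean_triples max_c) := by
  unfold Pre_find_pythagorean_triples; infer_instance

def pvWitness_find_pythagorean_triples : Int := 30

def Spec_find_pythagorean_triples (max_c : Int) (out : List (Int × Int × Int)) : Prop :=
  out = find_pythagorean_triples_alt max_c
instance (max_c : Int) (out : List (Int × Int × Int)) : Decidable (Spec_find_pythagorean_triples max_c out) := by
  unfold Spec_find_pythagorean_triples; infer_instance

-- ===== CLAIM (what is proved, stated in full; the proofs are below) =====
def Claim_equal_find_pythagorean_triples : Prop :=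
  ∀ (max_c : Int), Dom_find_pythagorean_triples max_c → Pre_find_pythagorean_triples max_c →
    Spec_find_pythagorean_triples max_c (find_pythagorean_triples max_c)

-- ===== LEMMAS AND PROOFS =====

-- the canonical condition both raw lists enumerate
def pvPT (max_c m n : Int) : Prop :=
  1 ≤ n ∧ n < m ∧ m * m + n * n ≤ max_c ∧
  (m + n) % 2 = 1 ∧ (Int.gcd m n : Int) = 1

def pvTrip (m n : Int) : Int × Int × Int :=
  (min (m * m - n * n) (2 * m * n), max (m * m - n * n) (2 * m * n), m * m + n * n)

lemma pvKey_inj : Function.Injective pvKey := by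
  intro a b h
  obtain ⟨a1, a2, a3⟩ := a
  obtain ⟨b1, b2, b3⟩ := b
  simp only [pvKey, toLex_inj, Prod.mk.injEq] at h
  simp_all

lemma pygcdLoop_eq (k : Nat) : ∀ (a b : Int), b.toNat ≤ k → 0 ≤ a → 0 ≤ b →
    pygcdLoop a b = (Nat.gcd a.toNat b.toNat : Int) := by
  induction k with
  | zero =>
    intro a b hbk ha hb
    have hb0 : b = 0 := by omega
    rw [pygcdLoop]
    simp [hb0, Int.toNat_of_nonneg ha]
  | succ k ih =>
    intro a b hbk ha hb
    by_cases hb0 : b = 0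
    · rw [pygcdLoop]; simp [hb0, Int.toNat_of_nonneg ha]
    · have hbpos : 0 < b := lt_of_le_of_ne hb (Ne.symm hb0)
      rw [pygcdLoop]
      simp only [hb0, ne_eq, not_false_eq_true, dif_pos]
      have hmod := PySem.Int.mod_eq_emod_of_pos (a := a) hbpos
      have hm1 : 0 ≤ PySem.Int.mod a b := PySem.Int.mod_nonneg a hbpos
      have hm2 : PySem.Int.mod a b < b := PySem.Int.mod_lt a hbpos
      rw [ih b (PySem.Int.mod a b) (by omega) hb hm1]
      congr 1
      have hcast : (PySem.Int.mod a b).toNat = a.toNat % b.toNat := by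
        have : a % b = ((a.toNat % b.toNat : Nat) : Int) := by
          rw [Int.natCast_mod, Int.toNat_of_nonneg ha, Int.toNat_of_nonneg hb]
        rw [hmod, this, Int.toNat_natCast]
      rw [hcast, Nat.gcd_comm b.toNat]
      exact (Nat.gcd_rec b.toNat a.toNat).symm.trans (Nat.gcd_comm b.toNat a.toNat)

lemma pygcd_eq (m n : Int) (hm : 0 ≤ m) (hn : 0 ≤ n) : pygcd m n = (Int.gcd m n : Int) := by
  unfold pygcd
  rw [abs_of_nonneg hm, abs_of_nonneg hn,
    pygcdLoop_eq n.toNat m n le_rfl hm hn]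
  have h1 : m.natAbs = m.toNat := by omega
  have h2 : n.natAbs = n.toNat := by omega
  unfold Int.gcd
  rw [h1, h2]

lemma pv_le_sqrt (m c : Int) (hm : 0 ≤ m) (h : m * m ≤ c) : m ≤ Int.sqrt c := by
  have hc : 0 ≤ c := le_trans (mul_self_nonneg m) h
  have h1 : m.toNat * m.toNat ≤ c.toNat := by
    have h2 : ((m.toNat * m.toNat : Nat) : Int) ≤ (c.toNat : Int) := by
      push_cast
      rw [Int.toNat_of_nonneg hm, Int.toNat_of_nonneg hc]
      exact h
    exact_mod_cast h2
  have h3 : m.toNat ≤ Nat.sqrt c.toNat := Nat.le_sqrt.mpr h1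
  unfold Int.sqrt
  omega

lemma pv_parity (m n : Int) :
    ¬ PySem.Int.mod (m - n) 2 = 0 ↔ (m + n) % 2 = 1 := by
  rw [PySem.Int.mod_eq_emod_of_pos (a := m - n) (by omega)]
  constructor <;> intro h <;> omega

lemma mem_pvRawA (max_c : Int) (x : Int × Int × Int) :
    x ∈ pvRawA max_c ↔ ∃ m n, pvPT max_c m n ∧ x = pvTrip m n := by
  unfold pvRawA
  have hfun : ∀ m : Int, (fun (acc : List (Int × Int × Int)) (n : Int) =>
      if PySem.Int.mod (m - n) 2 = 0 ∨ pygcd m n ≠ 1 then acc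
      else
        let a := m ^ 2 - n ^ 2
        let b := 2 * m * n
        let c := m ^ 2 + n ^ 2
        if c ≤ max_c then acc ++ [(min a b, max a b, c)] else acc) =
      fun acc n =>
        if (¬(PySem.Int.mod (m - n) 2 = 0 ∨ pygcd m n ≠ 1) ∧ m ^ 2 + n ^ 2 ≤ max_c) then
          acc ++ [(min (m ^ 2 - n ^ 2) (2 * m * n), max (m ^ 2 - n ^ 2) (2 * m * n), m ^ 2 + n ^ 2)]
        else acc := by
    intro m; funext acc n
    by_cases h1 : PySem.Int.mod (m - n) 2 = 0 ∨ pygcd m n ≠ 1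
    · rw [if_pos h1, if_neg (fun hc => hc.1 h1)]
    · rw [if_neg h1]
      show (if m ^ 2 + n ^ 2 ≤ max_c then
          acc ++ [(min (m ^ 2 - n ^ 2) (2 * m * n), max (m ^ 2 - n ^ 2) (2 * m * n), m ^ 2 + n ^ 2)]
        else acc) = _
      by_cases h2 : m ^ 2 + n ^ 2 ≤ max_c
      · rw [if_pos h2, if_pos ⟨h1, h2⟩]
      · rw [if_neg h2, if_neg (fun hc => h2 hc.2)]
  simp only [hfun, PySem.List.foldl_append_ite]
  rw [PySem.List.foldl_append_eq_flatMap]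
  simp only [List.nil_append, List.mem_flatMap, List.mem_map, List.mem_filter,
    PySem.List.mem_pyRange_one, decide_eq_true_eq]
  constructor
  · rintro ⟨m, ⟨hm2, hmlt⟩, n, ⟨⟨hn1, hnm⟩, hcond, hc⟩, rfl⟩
    push Not at hcond
    refine ⟨m, n, ⟨hn1, hnm, by nlinarith, ?_, ?_⟩, ?_⟩
    · exact (pv_parity m n).mp hcond.1
    · rw [← pygcd_eq m n (by omega) (by omega)]
      exact hcond.2
    · simp [pvTrip, pow_two]
  · rintro ⟨m, n, ⟨hn1, hnm, hc, hpar, hgcd⟩, rfl⟩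
    refine ⟨m, ⟨by omega, ?_⟩, n, ⟨⟨hn1, hnm⟩, ?_, by nlinarith⟩, ?_⟩
    · have : m ≤ Int.sqrt max_c := pv_le_sqrt m max_c (by omega) (by nlinarith)
      omega
    · rintro (hA | hB)
      · exact (pv_parity m n).mpr hpar hA
      · exact hB (by rw [pygcd_eq m n (by omega) (by omega)]; exact hgcd)
    · simp [pvTrip, pow_two]

-- ===== B-side lemmas: reachability in Berggren's tree =====

-- reachability from t to u in the (unpruned) tree
inductive PvR : Int × Int × Int → Int × Int × Int → Prop
  | refl (t) : PvR t t
  | s1 {t u} : PvR (pvC1 t) u → PvR t u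
  | s2 {t u} : PvR (pvC2 t) u → PvR t u
  | s3 {t u} : PvR (pvC3 t) u → PvR t u

lemma pvR_inv {t u : Int × Int × Int} (h : PvR t u) (hi : pvInv t) :
    pvInv u ∧ t.2.2 ≤ u.2.2 := by
  induction h with
  | refl t => exact ⟨hi, le_rfl⟩
  | s1 _ ih =>
    obtain ⟨h1, h2⟩ := ih (pvInv_c1 _ hi).1
    exact ⟨h1, le_trans (le_of_lt (pvInv_c1 _ hi).2) h2⟩
  | s2 _ ih =>
    obtain ⟨h1, h2⟩ := ih (pvInv_c2 _ hi).1
    exact ⟨h1, le_trans (le_of_lt (pvInv_c2 _ hi).2) h2⟩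
  | s3 _ ih =>
    obtain ⟨h1, h2⟩ := ih (pvInv_c3 _ hi).1
    exact ⟨h1, le_trans (le_of_lt (pvInv_c3 _ hi).2) h2⟩

lemma pvR_cases (t u : Int × Int × Int) :
    PvR t u ↔ u = t ∨ PvR (pvC1 t) u ∨ PvR (pvC2 t) u ∨ PvR (pvC3 t) u := by
  constructor
  · intro h
    cases h with
    | refl => exact Or.inl rfl
    | s1 h => exact Or.inr (Or.inl h)
    | s2 h => exact Or.inr (Or.inr (Or.inl h))
    | s3 h => exact Or.inr (Or.inr (Or.inr h))
  · rintro (rfl | h | h | h)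
    · exact PvR.refl _
    · exact PvR.s1 h
    · exact PvR.s2 h
    · exact PvR.s3 h

lemma pvR_trans {t u v : Int × Int × Int} (h1 : PvR t u) (h2 : PvR u v) : PvR t v := by
  induction h1 with
  | refl => exact h2
  | s1 _ ih => exact PvR.s1 (ih h2)
  | s2 _ ih => exact PvR.s2 (ih h2)
  | s3 _ ih => exact PvR.s3 (ih h2)

-- a live node expands into its own triple plus its three subtrees
lemma pvQ_expand (max_c : Int) (t x : Int × Int × Int) (hle : t.2.2 ≤ max_c) :
    (∃ u, PvR t u ∧ u.2.2 ≤ max_c ∧ x = (min u.1 u.2.1, max u.1 u.2.1, u.2.2)) ↔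
      x = (min t.1 t.2.1, max t.1 t.2.1, t.2.2) ∨
      (∃ u, PvR (pvC1 t) u ∧ u.2.2 ≤ max_c ∧ x = (min u.1 u.2.1, max u.1 u.2.1, u.2.2)) ∨
      (∃ u, PvR (pvC2 t) u ∧ u.2.2 ≤ max_c ∧ x = (min u.1 u.2.1, max u.1 u.2.1, u.2.2)) ∨
      (∃ u, PvR (pvC3 t) u ∧ u.2.2 ≤ max_c ∧ x = (min u.1 u.2.1, max u.1 u.2.1, u.2.2)) := by
  constructor
  · rintro ⟨u, hr, h1, h2⟩
    rcases (pvR_cases t u).mp hr with rfl | h | h | h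
    · exact Or.inl h2
    · exact Or.inr (Or.inl ⟨u, h, h1, h2⟩)
    · exact Or.inr (Or.inr (Or.inl ⟨u, h, h1, h2⟩))
    · exact Or.inr (Or.inr (Or.inr ⟨u, h, h1, h2⟩))
  · rintro (h | ⟨u, hr, h1, h2⟩ | ⟨u, hr, h1, h2⟩ | ⟨u, hr, h1, h2⟩)
    · exact ⟨t, PvR.refl t, hle, h⟩
    · exact ⟨u, PvR.s1 hr, h1, h2⟩
    · exact ⟨u, PvR.s2 hr, h1, h2⟩
    · exact ⟨u, PvR.s3 hr, h1, h2⟩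

-- a pruned node's subtree contributes nothing
lemma pvQ_dead (max_c : Int) (t x : Int × Int × Int) (hgt : ¬ t.2.2 ≤ max_c) (hi : pvInv t) :
    ¬ ∃ u, PvR t u ∧ u.2.2 ≤ max_c ∧ x = (min u.1 u.2.1, max u.1 u.2.1, u.2.2) := by
  rintro ⟨u, hr, h1, _⟩
  have := (pvR_inv hr hi).2
  omega

-- what the stack loop collects
lemma mem_pvLoop (max_c : Int) (stack : List {t : Int × Int × Int // pvInv t})
    (out : List (Int × Int × Int)) (x : Int × Int × Int) :
    x ∈ pvLoop max_c stack out ↔ x ∈ out ∨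
      ∃ s ∈ stack, ∃ u, PvR s.1 u ∧ u.2.2 ≤ max_c ∧
        x = (min u.1 u.2.1, max u.1 u.2.1, u.2.2) := by
  induction stack, out using pvLoop.induct (max_c := max_c) with
  | case1 out => simp [pvLoop]
  | case2 out t h rest hle ih =>
    rw [pvLoop]
    simp only [dif_pos hle]
    rw [ih]
    simp only [List.mem_cons, List.mem_append, List.not_mem_nil]
    rw [show (∃ s, (s = (⟨t, h⟩ : {t : Int × Int × Int // pvInv t}) ∨ s ∈ rest) ∧
        ∃ u, PvR s.1 u ∧ u.2.2 ≤ max_c ∧ x = (min u.1 u.2.1, max u.1 u.2.1, u.2.2)) ↔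
        ((∃ u, PvR t u ∧ u.2.2 ≤ max_c ∧ x = (min u.1 u.2.1, max u.1 u.2.1, u.2.2)) ∨
         ∃ s, s ∈ rest ∧ ∃ u, PvR s.1 u ∧ u.2.2 ≤ max_c ∧
           x = (min u.1 u.2.1, max u.1 u.2.1, u.2.2)) from by
      constructor
      · rintro ⟨s, (rfl | hs), hq⟩
        · exact Or.inl hq
        · exact Or.inr ⟨s, hs, hq⟩
      · rintro (hq | ⟨s, hs, hq⟩)
        · exact ⟨⟨t, h⟩, Or.inl rfl, hq⟩
        · exact ⟨s, Or.inr hs, hq⟩]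
    rw [pvQ_expand max_c t x hle]
    constructor
    · rintro ((hx | hx | hf) | ⟨s, (rfl | rfl | rfl | hs), hq⟩)
      · exact Or.inl hx
      · exact Or.inr (Or.inl (Or.inl hx))
      · exact hf.elim
      · exact Or.inr (Or.inl (Or.inr (Or.inr (Or.inr hq))))
      · exact Or.inr (Or.inl (Or.inr (Or.inr (Or.inl hq))))
      · exact Or.inr (Or.inl (Or.inr (Or.inl hq)))
      · exact Or.inr (Or.inr ⟨s, hs, hq⟩)
    · rintro (hx | (hx | hq | hq | hq) | ⟨s, hs, hq⟩)
      · exact Or.inl (Or.inl hx)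
      · exact Or.inl (Or.inr (Or.inl hx))
      · exact Or.inr ⟨_, Or.inr (Or.inr (Or.inl rfl)), hq⟩
      · exact Or.inr ⟨_, Or.inr (Or.inl rfl), hq⟩
      · exact Or.inr ⟨_, Or.inl rfl, hq⟩
      · exact Or.inr ⟨s, Or.inr (Or.inr (Or.inr hs)), hq⟩
  | case3 out t h rest hgt ih =>
    rw [pvLoop]
    simp only [dif_neg hgt]
    rw [ih]
    simp only [List.mem_cons]
    constructor
    · rintro (hx | ⟨s, hs, hq⟩)
      · exact Or.inl hx
      · exact Or.inr ⟨s, Or.inr hs, hq⟩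
    · rintro (hx | ⟨s, (rfl | hs), hq⟩)
      · exact Or.inl hx
      · exact absurd hq (pvQ_dead max_c t x hgt h)
      · exact Or.inr ⟨s, hs, hq⟩

-- the ternary tree on Euclid parameter pairs
inductive PvPair : Int → Int → Prop
  | root : PvPair 2 1
  | s1 {m n} : PvPair m n → PvPair (2 * m - n) m
  | s2 {m n} : PvPair m n → PvPair (2 * m + n) m
  | s3 {m n} : PvPair m n → PvPair (m + 2 * n) n

def pvE (m n : Int) : Int × Int × Int := (m * m - n * n, 2 * m * n, m * m + n * n)

lemma pvC1_E (m n : Int) : pvC1 (pvE m n) = pvE (2 * m - n) m := by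
  simp only [pvC1, pvE, Prod.mk.injEq]
  refine ⟨by ring, by ring, by ring⟩

lemma pvC2_E (m n : Int) : pvC2 (pvE m n) = pvE (2 * m + n) m := by
  simp only [pvC2, pvE, Prod.mk.injEq]
  refine ⟨by ring, by ring, by ring⟩

lemma pvC3_E (m n : Int) : pvC3 (pvE m n) = pvE (m + 2 * n) n := by
  simp only [pvC3, pvE, Prod.mk.injEq]
  refine ⟨by ring, by ring, by ring⟩

lemma pvR_root_sound {t u : Int × Int × Int} (h : PvR t u) :
    ∀ m n, t = pvE m n → PvPair m n → ∃ m' n', PvPair m' n' ∧ u = pvE m' n' := by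
  induction h with
  | refl t => exact fun m n ht hp => ⟨m, n, hp, ht⟩
  | s1 _ ih => exact fun m n ht hp => ih (2 * m - n) m (by rw [ht, pvC1_E]) (PvPair.s1 hp)
  | s2 _ ih => exact fun m n ht hp => ih (2 * m + n) m (by rw [ht, pvC2_E]) (PvPair.s2 hp)
  | s3 _ ih => exact fun m n ht hp => ih (m + 2 * n) n (by rw [ht, pvC3_E]) (PvPair.s3 hp)

lemma pvPair_reach {m n : Int} (h : PvPair m n) : PvR (pvE 2 1) (pvE m n) := by
  induction h with
  | root => exact PvR.refl _
  | s1 _ ih => exact pvR_trans ih (by rw [← pvC1_E]; exact PvR.s1 (PvR.refl _))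
  | s2 _ ih => exact pvR_trans ih (by rw [← pvC2_E]; exact PvR.s2 (PvR.refl _))
  | s3 _ ih => exact pvR_trans ih (by rw [← pvC3_E]; exact PvR.s3 (PvR.refl _))

lemma pv_gcd_shiftL (a b k : Int) (h : Int.gcd a b = 1) : Int.gcd (a + k * b) b = 1 := by
  rw [← Int.isCoprime_iff_gcd_eq_one] at h ⊢; exact h.add_mul_right_left k

lemma pv_gcd_shiftR (a b k : Int) (h : Int.gcd a b = 1) : Int.gcd a (b + a * k) = 1 := by
  rw [← Int.isCoprime_iff_gcd_eq_one] at h ⊢; exact h.add_mul_left_right k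

lemma pvPair_sound {m n : Int} (h : PvPair m n) :
    1 ≤ n ∧ n < m ∧ Int.gcd m n = 1 ∧ (m + n) % 2 = 1 := by
  induction h with
  | root => refine ⟨by norm_num, by norm_num, by decide, by decide⟩
  | @s1 m n _ ih =>
    obtain ⟨h1, h2, h3, h4⟩ := ih
    refine ⟨by omega, by omega, ?_, by omega⟩
    have hn : Int.gcd (-n) m = 1 := by rw [Int.neg_gcd, Int.gcd_comm]; exact h3
    have := pv_gcd_shiftL (-n) m 2 hn
    rwa [show -n + 2 * m = 2 * m - n by ring] at this
  | @s2 m n _ ih =>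
    obtain ⟨h1, h2, h3, h4⟩ := ih
    refine ⟨by omega, by omega, ?_, by omega⟩
    have hn : Int.gcd n m = 1 := by rw [Int.gcd_comm]; exact h3
    have := pv_gcd_shiftL n m 2 hn
    rwa [show n + 2 * m = 2 * m + n by ring] at this
  | @s3 m n _ ih =>
    obtain ⟨h1, h2, h3, h4⟩ := ih
    refine ⟨by omega, by omega, ?_, by omega⟩
    have := pv_gcd_shiftL m n 2 h3
    rwa [show m + 2 * n = m + 2 * n by ring] at this

lemma pv_unit_of_dvd (n d : Int) (h : Int.gcd (d * n) n = 1) (h1 : 1 ≤ n) : n = 1 := by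
  rw [← Int.isCoprime_iff_gcd_eq_one] at h
  have hu : IsUnit n := h.isUnit_of_dvd' ⟨d, by ring⟩ dvd_rfl
  rcases Int.isUnit_iff.mp hu with h | h <;> omega

lemma pvPair_complete (k : Nat) : ∀ m n : Int, m.toNat ≤ k → 1 ≤ n → n < m →
    Int.gcd m n = 1 → (m + n) % 2 = 1 → PvPair m n := by
  induction k with
  | zero => intro m n hk h1 h2 _ _; omega
  | succ k ih =>
    intro m n hk h1 h2 h3 h4
    rcases lt_trichotomy m (2 * n) with hlt | heq | hgt
    · -- parent (n, 2n - m), child map s1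
      have hg : Int.gcd n (2 * n - m) = 1 := by
        have hn : Int.gcd n (-m) = 1 := by
          rw [Int.gcd_comm, Int.neg_gcd]; exact h3
        have := pv_gcd_shiftR n (-m) 2 hn
        rwa [show -m + n * 2 = 2 * n - m by ring] at this
      have hp := PvPair.s1 (ih n (2 * n - m) (by omega) (by omega) (by omega) hg (by omega))
      rwa [show 2 * n - (2 * n - m) = m by ring] at hp
    · have hn1 : n = 1 := pv_unit_of_dvd n 2 (by rw [← heq]; exact h3) h1
      have : m = 2 := by omega
      subst hn1; subst this
      exact PvPair.root
    · rcases lt_trichotomy m (3 * n) with hlt3 | heq3 | hgt3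
      · -- parent (n, m - 2n), child map s2
        have hg : Int.gcd n (m - 2 * n) = 1 := by
          have hn : Int.gcd n m = 1 := by rw [Int.gcd_comm]; exact h3
          have := pv_gcd_shiftR n m (-2)
          rw [show m + n * (-2) = m - 2 * n by ring] at this
          exact this hn
        have hp := PvPair.s2 (ih n (m - 2 * n) (by omega) (by omega) (by omega) hg (by omega))
        rwa [show 2 * n + (m - 2 * n) = m by ring] at hp
      · -- m = 3n forces n = 1, m = 3; but then m + n is even, contradiction
        have hn1 : n = 1 := pv_unit_of_dvd n 3 (by rw [← heq3]; exact h3) h1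
        omega
      · -- parent (m - 2n, n), child map s3
        have hg : Int.gcd (m - 2 * n) n = 1 := by
          have := pv_gcd_shiftL m n (-2) h3
          rwa [show m + (-2) * n = m - 2 * n by ring] at this
        have hp := PvPair.s3 (ih (m - 2 * n) n (by omega) h1 (by omega) hg (by omega))
        rwa [show m - 2 * n + 2 * n = m by ring] at hp

lemma mem_pvRawB (max_c : Int) (x : Int × Int × Int) :
    x ∈ pvRawB max_c ↔ ∃ m n, pvPT max_c m n ∧ x = pvTrip m n := by
  unfold pvRawB
  rw [mem_pvLoop]
  simp only [List.not_mem_nil, false_or, List.mem_singleton, exists_eq_left]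
  constructor
  · rintro ⟨u, hr, hle, rfl⟩
    obtain ⟨m, n, hp, rfl⟩ := pvR_root_sound hr 2 1 (by decide) PvPair.root
    obtain ⟨q1, q2, q3, q4⟩ := pvPair_sound hp
    exact ⟨m, n, ⟨q1, q2, hle, q4, by exact_mod_cast congrArg (Nat.cast : Nat → Int) q3⟩, rfl⟩
  · rintro ⟨m, n, ⟨q1, q2, q3, q4, q5⟩, rfl⟩
    have hg : Int.gcd m n = 1 := by exact_mod_cast q5
    have hr := pvPair_reach (pvPair_complete m.toNat m n le_rfl q1 q2 hg q4)
    exact ⟨pvE m n, by rw [show ((3 : Int), (4 : Int), (5 : Int)) = pvE 2 1 by decide]; exact hr,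
      q3, rfl⟩

-- ===== VERDICT (by name: the statement is the Claim_ definition above) =====
theorem find_pythagorean_triples_spec : Claim_equal_find_pythagorean_triples := by
  intro max_c hdom hpre
  unfold Spec_find_pythagorean_triples
  unfold find_pythagorean_triples find_pythagorean_triples_alt
  apply PySem.List.sorted_eq_sorted_of_perm _ _ pvKey pvKey_inj
  rw [List.perm_ext_iff_of_nodup (PySem.Set.nodup_ofList _) (PySem.Set.nodup_ofList _)]
  intro a
  rw [PySem.Set.mem_ofList, PySem.Set.mem_ofList, mem_pvRawA, mem_pvRawB]
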